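-- pv_equiv track=rewrite | github.com/idnbso/advent-of-code-2022 | day03/rucksack_reorganization.py | get_sum_of_badges_priorities
-- ===== SOURCE A (Python) =====
-- def get_sum_of_badges_priorities(rucksacks: list):
--     TOTAL_ELVES_TO_CHECK = 3
--     sum_of_priorities = 0
--
--     group_set = set()
--     for rucksackIndex in range(len(rucksacks) + 1):
--         if rucksackIndex % TOTAL_ELVES_TO_CHECK == 0:
--             for item in group_set:
--                 sum_of_priorities += get_item_priority(item)
--
--             if rucksackIndex >= len(rucksacks):
--                 break
--
--             group_set = set(list(rucksacks[rucksackIndex]))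
--             continue
--
--         common_set = set()
--         for item in rucksacks[rucksackIndex]:
--             if item in group_set:
--                 common_set.add(item)
--
--         group_set = common_set
--
--     return sum_of_priorities
--
-- def get_item_priority(item: str):
--     if item >= 'a' and item <= 'z':
--         return ord(item) - ord('a') + 1
--     elif item >= 'A' and item <= 'Z':
--         return ord(item) - ord('A') + 27
--     raise ValueError('Item can only be a lower-case or upper-case english character.')
-- ===== SOURCE B (Python) =====
-- def get_item_priority(item: str):
--     if item >= 'a' and item <= 'z':
--         return ord(item) - ord('a') + 1
--     elif item >= 'A' and item <= 'Z':
--         return ord(item) - ord('A') + 27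
--     raise ValueError('Item can only be a lower-case or upper-case english character.')
--
--
-- def get_sum_of_badges_priorities(rucksacks: list):
--     total = 0
--     i = 0
--     while i < len(rucksacks):
--         common = set(rucksacks[i]) & set(rucksacks[i + 1]) & set(rucksacks[i + 2])
--         total += sum(map(get_item_priority, common))
--         i += 3
--     return total
-- ===== Notes on version B (the rewrite author's own statement) =====
-- stated objective: simpler
-- what changed: Replaces the modulo-driven state machine over range(len+1) that threads a running intersection set through per-index branches with a direct while-loop over group start indices that intersects the three rucksacks' character sets at once and adds the group's priorities.
import Mathlib
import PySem

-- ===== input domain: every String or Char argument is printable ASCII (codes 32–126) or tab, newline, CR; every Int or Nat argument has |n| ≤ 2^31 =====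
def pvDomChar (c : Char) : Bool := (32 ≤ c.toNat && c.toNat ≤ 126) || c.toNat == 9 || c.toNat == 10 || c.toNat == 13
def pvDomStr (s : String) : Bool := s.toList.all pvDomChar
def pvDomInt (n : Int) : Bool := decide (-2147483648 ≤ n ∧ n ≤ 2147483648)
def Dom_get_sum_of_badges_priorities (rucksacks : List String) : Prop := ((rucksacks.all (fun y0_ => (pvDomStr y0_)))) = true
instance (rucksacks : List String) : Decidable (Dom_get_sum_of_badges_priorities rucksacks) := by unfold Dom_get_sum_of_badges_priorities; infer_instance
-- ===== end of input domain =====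

-- B replaces A's modulo-driven state machine over range(len+1) with a direct
-- while-loop over group start indices intersecting the three sets at once (simpler).

-- ===== PORT A =====
-- get_item_priority: the ValueError branch (non-letter item) is excluded by
-- Pre_get_sum_of_badges_priorities; the port returns 0 there (never reached inside Pre_).
def item_priority (c : Char) : Int :=
  if 'a' ≤ c ∧ c ≤ 'z' then (c.toNat : Int) - 97 + 1
  else if 'A' ≤ c ∧ c ≤ 'Z' then (c.toNat : Int) - 65 + 27
  else 0

-- the for-loop over range(len(rucksacks)+1), index by index; rucksacks[i] out of
-- range (Python IndexError, excluded by Pre_) is List.getD with default "".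
def pyA_loop (ru : List String) (idxs : List Nat) (group : PySem.Set Char) (acc : Int) : Int :=
  match idxs with
  | [] => acc
  | i :: rest =>
    if i % 3 = 0 then
      let acc2 := group.foldl (fun a c => a + item_priority c) acc
      if ru.length ≤ i then acc2
      else pyA_loop ru rest (PySem.Set.ofList (ru.getD i "").toList) acc2
    else
      pyA_loop ru rest
        ((ru.getD i "").toList.foldl
          (fun s c => if PySem.Set.contains group c then PySem.Set.add s c else s)
          PySem.Set.empty) acc

def get_sum_of_badges_priorities (rucksacks : List String) : Int :=
  pyA_loop rucksacks (List.range (rucksacks.length + 1)) PySem.Set.empty 0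

-- ===== PORT B =====
-- while i < len(rucksacks): intersect the three sets, add priorities, i += 3.
def pyB_loop (ru : List String) (i : Nat) (total : Int) : Int :=
  if i < ru.length then
    let common := PySem.Set.inter
        (PySem.Set.inter (PySem.Set.ofList (ru.getD i "").toList)
          (PySem.Set.ofList (ru.getD (i + 1) "").toList))
        (PySem.Set.ofList (ru.getD (i + 2) "").toList)
    pyB_loop ru (i + 3) (total + (common.map item_priority).sum)
  else total
termination_by ru.length - i
decreasing_by omega

def get_sum_of_badges_priorities_alt (rucksacks : List String) : Int :=
  pyB_loop rucksacks 0 0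

-- ===== PRECONDITION & SPEC =====
def pyIsLetter (c : Char) : Bool := ('a' ≤ c && c ≤ 'z') || ('A' ≤ c && c ≤ 'Z')

-- Pre_: exactly where Python A returns: a length not divisible by 3 raises
-- IndexError, and a non-letter character common to all three rucksacks of some
-- group raises ValueError in get_item_priority.
def Pre_get_sum_of_badges_priorities (rucksacks : List String) : Prop :=
  rucksacks.length % 3 = 0 ∧
  ((List.range (rucksacks.length / 3)).all (fun k =>
    ((rucksacks.getD (3 * k) "").toList.filter (fun c =>
        ((rucksacks.getD (3 * k + 1) "").toList.contains c) &&
        ((rucksacks.getD (3 * k + 2) "").toList.contains c))).all pyIsLetter)) = true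

instance (rucksacks : List String) : Decidable (Pre_get_sum_of_badges_priorities rucksacks) := by
  unfold Pre_get_sum_of_badges_priorities; infer_instance

def pvWitness_get_sum_of_badges_priorities : List String :=
  ["abc", "bcd", "cde", "Zx", "xZ", "ZxQ"]

def Spec_get_sum_of_badges_priorities (rucksacks : List String) (out : Int) : Prop :=
  out = get_sum_of_badges_priorities_alt rucksacks
instance (rucksacks : List String) (out : Int) : Decidable (Spec_get_sum_of_badges_priorities rucksacks out) := by
  unfold Spec_get_sum_of_badges_priorities; infer_instance

-- ===== CLAIM (what is proved, stated in full; the proofs are below) =====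
def Claim_equal_get_sum_of_badges_priorities : Prop :=
  ∀ (rucksacks : List String), Dom_get_sum_of_badges_priorities rucksacks →
    Pre_get_sum_of_badges_priorities rucksacks →
    Spec_get_sum_of_badges_priorities rucksacks (get_sum_of_badges_priorities rucksacks)

-- ===== LEMMAS AND PROOFS =====

-- membership in A's conditional-add fold (the inner 'if item in group_set' loop)
theorem mem_condAddFold (g : PySem.Set Char) (l : List Char) (s : PySem.Set Char) (x : Char) :
    x ∈ l.foldl (fun s c => if PySem.Set.contains g c then PySem.Set.add s c else s) s ↔
      x ∈ s ∨ (x ∈ l ∧ x ∈ g) := by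
  induction l generalizing s with
  | nil => simp
  | cons c t ih =>
    simp only [List.foldl_cons, ih]
    split_ifs with h
    · have hc : c ∈ g := (PySem.Set.contains_iff g c).1 h
      simp only [PySem.Set.mem_add, List.mem_cons]
      by_cases hx : x = c
      · subst hx; tauto
      · tauto
    · have hc : c ∉ g := fun hm => h ((PySem.Set.contains_iff g c).2 hm)
      simp only [List.mem_cons]
      by_cases hx : x = c
      · subst hx; tauto
      · tauto

theorem nodup_condAddFold (g : PySem.Set Char) (l : List Char) (s : PySem.Set Char)
    (hs : s.Nodup) :
    (l.foldl (fun s c => if PySem.Set.contains g c then PySem.Set.add s c else s) s).Nodup := by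
  induction l generalizing s with
  | nil => exact hs
  | cons c t ih =>
    simp only [List.foldl_cons]
    split
    · exact ih _ (PySem.Set.nodup_add s c hs)
    · exact ih _ hs

-- equal sums over two nodup sets with the same members
theorem sum_prio_eq (s t : PySem.Set Char) (hs : s.Nodup) (ht : t.Nodup)
    (h : ∀ x, x ∈ s ↔ x ∈ t) :
    (s.map item_priority).sum = (t.map item_priority).sum :=
  List.Perm.sum_eq (List.Perm.map _ ((List.perm_ext_iff_of_nodup hs ht).2 h))

-- main invariant: from a group boundary i (i % 3 = 0, i ≤ len, len % 3 = 0),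
-- A's loop first flushes the carried group, then equals B's loop from i.
theorem main_inv (ru : List String) (hlen : ru.length % 3 = 0) :
    ∀ (k i : Nat), i + 3 * k = ru.length → ∀ (group : PySem.Set Char) (acc : Int),
      pyA_loop ru (List.range' i (ru.length + 1 - i)) group acc =
        pyB_loop ru i (acc + (group.map item_priority).sum) := by
  intro k
  induction k with
  | zero =>
    intro i hi group acc
    have hi' : i = ru.length := by omega
    subst hi'
    have h1 : ru.length + 1 - ru.length = 1 := by omega
    rw [h1, List.range'_one, pyA_loop, pyB_loop]
    simp [hlen, PySem.List.foldl_add]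
  | succ k ih =>
    intro i hi group acc
    have hi3 : i % 3 = 0 := by omega
    have hilt : i < ru.length := by omega
    have hsplit : ru.length + 1 - i = ((ru.length + 1 - (i + 3)) + 1 + 1) + 1 := by omega
    rw [hsplit, List.range'_succ, List.range'_succ, List.range'_succ]
    rw [pyA_loop, if_pos hi3, if_neg (by omega : ¬ ru.length ≤ i)]
    rw [pyA_loop, if_neg (by omega : ¬ (i + 1) % 3 = 0)]
    rw [pyA_loop, if_neg (by omega : ¬ (i + 1 + 1) % 3 = 0)]
    have harr : i + 1 + 1 + 1 = i + 3 := by omega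
    rw [harr, ih (i + 3) (by omega)]
    conv_rhs => rw [pyB_loop, if_pos hilt]
    rw [PySem.List.foldl_add]
    have h12 : i + 1 + 1 = i + 2 := by omega
    rw [h12]
    have hsets : ((List.foldl
        (fun s c => if PySem.Set.contains (List.foldl
            (fun s c => if PySem.Set.contains (PySem.Set.ofList (ru.getD i "").toList) c then PySem.Set.add s c else s)
            PySem.Set.empty (ru.getD (i + 1) "").toList) c then PySem.Set.add s c else s)
        PySem.Set.empty (ru.getD (i + 2) "").toList).map item_priority).sum =
      ((PySem.Set.inter (PySem.Set.inter (PySem.Set.ofList (ru.getD i "").toList)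
          (PySem.Set.ofList (ru.getD (i + 1) "").toList))
          (PySem.Set.ofList (ru.getD (i + 2) "").toList)).map item_priority).sum := by
      apply sum_prio_eq
      · exact nodup_condAddFold _ _ _ List.nodup_nil
      · exact PySem.Set.nodup_inter _ _
          (PySem.Set.nodup_inter _ _ (PySem.Set.nodup_ofList _))
      · intro x
        rw [mem_condAddFold, PySem.Set.mem_inter, PySem.Set.mem_inter, mem_condAddFold]
        simp only [PySem.Set.mem_ofList]
        tauto
    rw [hsets]

-- ===== VERDICT (by name: the statement is the Claim_ definition above) =====
theorem get_sum_of_badges_priorities_spec : Claim_equal_get_sum_of_badges_priorities := by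
  intro ru _ hpre
  unfold Spec_get_sum_of_badges_priorities get_sum_of_badges_priorities get_sum_of_badges_priorities_alt
  have hlen := hpre.1
  have h := main_inv ru hlen (ru.length / 3) 0 (by omega) PySem.Set.empty 0
  simp only [Nat.sub_zero] at h
  rw [List.range_eq_range']
  simpa using h
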